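-- pv_equiv track=rewrite | github.com/PPeitsch/python | 05-List_comprehension/5.1_generala.py | es_generala
-- ===== SOURCE A (Python) =====
-- def es_generala(tirada):
--     contador = False
--     resultado = False
--     for i in range(len(tirada)-1):
--         if tirada[i] == tirada[i+1]:
--             contador += 1
--     if contador == len(tirada)-1:
--         resultado = True
--     return resultado
-- ===== SOURCE B (Python) =====
-- def es_generala(tirada):
--     return len(set(tirada)) == 1
-- ===== Notes on version B (the rewrite author's own statement) =====
-- stated objective: simpler
-- what changed: Replaces the index loop counting adjacent equal pairs (and the boolean-as-counter trick) with a single set-cardinality test len(set(tirada)) == 1.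
import Mathlib
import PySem

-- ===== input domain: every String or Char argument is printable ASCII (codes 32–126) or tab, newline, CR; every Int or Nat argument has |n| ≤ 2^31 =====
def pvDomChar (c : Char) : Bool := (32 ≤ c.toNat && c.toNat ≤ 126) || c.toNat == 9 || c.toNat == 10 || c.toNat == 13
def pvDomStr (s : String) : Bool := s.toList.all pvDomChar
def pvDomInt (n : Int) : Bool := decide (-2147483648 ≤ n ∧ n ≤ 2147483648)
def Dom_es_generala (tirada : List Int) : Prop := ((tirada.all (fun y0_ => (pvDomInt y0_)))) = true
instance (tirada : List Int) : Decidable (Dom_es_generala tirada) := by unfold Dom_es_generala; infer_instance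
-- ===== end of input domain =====

-- B replaces A's adjacent-pair counting loop with a single set-cardinality test (simpler).

-- ===== PORT A =====
-- tirada[i] and tirada[i+1] are always in range for i in range(len-1), so pyGetD is exact here.
-- Python's 'contador = False' then 'contador += 1' is integer arithmetic (False == 0): ported as Int 0.
def es_generala (tirada : List Int) : Bool :=
  let contador : Int :=
    (PySem.List.pyRange 0 ((tirada.length : Int) - 1) 1).foldl
      (fun c i =>
        if PySem.List.pyGetD tirada i 0 = PySem.List.pyGetD tirada (i + 1) 0 then c + 1 else c) 0
  if contador = (tirada.length : Int) - 1 then true else false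

-- ===== PORT B =====
def es_generala_alt (tirada : List Int) : Bool :=
  decide (PySem.Set.len (PySem.Set.ofList tirada) = 1)

-- ===== PRECONDITION & SPEC =====
def Spec_es_generala (tirada : List Int) (out : Bool) : Prop := out = es_generala_alt tirada
instance (tirada : List Int) (out : Bool) : Decidable (Spec_es_generala tirada out) := by unfold Spec_es_generala; infer_instance

-- ===== CLAIM (what is proved, stated in full; the proofs are below) =====
def Claim_equal_es_generala : Prop := ∀ (tirada : List Int), Dom_es_generala tirada → Spec_es_generala tirada (es_generala tirada)

-- ===== LEMMAS AND PROOFS =====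

-- "every element of xs equals x" — both ports reduce to this on a nonempty input x :: xs
def allEqTo (x : Int) (xs : List Int) : Bool := xs.all (· == x)

-- B-side characterisation
theorem esB_char (x : Int) (xs : List Int) :
    es_generala_alt (x :: xs) = allEqTo x xs := by
  simp only [es_generala_alt, allEqTo, PySem.Set.ofList_cons, PySem.Set.len]
  rw [Bool.eq_iff_iff]
  simp [List.length_eq_zero_iff, List.eq_nil_iff_forall_not_mem,
        PySem.Set.mem_discard, PySem.Set.mem_ofList]

-- from the adjacent-equality hypothesis, every valid index of xs holds x
theorem getD_all_eq (x : Int) (xs : List Int)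
    (h : ∀ k < xs.length, (x :: xs).getD k 0 = (x :: xs).getD (k + 1) 0) :
    ∀ k < xs.length, xs.getD k 0 = x := by
  intro k hk
  induction k with
  | zero => exact (h 0 hk).symm
  | succ j ih =>
      have hj : j < xs.length := Nat.lt_of_succ_lt hk
      have := h (j + 1) hk
      simp only [List.getD_cons_succ] at this
      exact this ▸ ih hj

-- adjacent equality on x :: xs ↔ every element of xs equals x
theorem adj_iff (x : Int) (xs : List Int) :
    (∀ k < xs.length, (x :: xs).getD k 0 = (x :: xs).getD (k + 1) 0) ↔ (∀ y ∈ xs, y = x) := by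
  constructor
  · intro h y hy
    obtain ⟨k, hk, rfl⟩ := List.mem_iff_getElem.mp hy
    have := getD_all_eq x xs h k hk
    rwa [List.getD_eq_getElem xs 0 hk] at this
  · intro h k hk
    have hx : ∀ j < xs.length, xs.getD j 0 = x := by
      intro j hj
      rw [List.getD_eq_getElem xs 0 hj]
      exact h _ (List.getElem_mem hj)
    cases k with
    | zero => exact (hx 0 hk).symm
    | succ j =>
        simp only [List.getD_cons_succ]
        rw [hx j (Nat.lt_of_succ_lt hk), hx (j + 1) hk]

-- the same statement through the pyGetD accesses A's port makes
theorem adj_iff' (x : Int) (xs : List Int) :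
    (∀ k < xs.length, PySem.List.pyGetD (x :: xs) (k : Int) 0 = PySem.List.pyGetD (x :: xs) (((k + 1 : Nat)) : Int) 0)
      ↔ (∀ y ∈ xs, y = x) := by
  simp only [PySem.List.pyGetD_natCast]
  exact adj_iff x xs

-- A-side characterisation
theorem esA_char (x : Int) (xs : List Int) :
    es_generala (x :: xs) = allEqTo x xs := by
  unfold es_generala allEqTo
  rw [show (((x :: xs).length : Int)) - 1 = (xs.length : Int) by simp]
  rw [PySem.List.pyRange_zero_nat, PySem.List.foldl_ite_add_one, List.countP_map]
  simp only [Function.comp_def, ← Nat.cast_add_one]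
  have hcl := @List.countP_eq_length _ (List.range xs.length)
    (fun k : Nat => decide (PySem.List.pyGetD (x :: xs) (k : Int) 0 = PySem.List.pyGetD (x :: xs) ((k + 1 : Nat) : Int) 0))
  rw [List.length_range] at hcl
  have key : (List.countP (fun k : Nat => decide (PySem.List.pyGetD (x :: xs) (k : Int) 0 = PySem.List.pyGetD (x :: xs) ((k + 1 : Nat) : Int) 0)) (List.range xs.length) = xs.length) ↔ (∀ y ∈ xs, y = x) := by
    rw [hcl, ← adj_iff' x xs]
    simp only [List.mem_range, decide_eq_true_eq]
  by_cases hall : ∀ y ∈ xs, y = x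
  · have hc := key.mpr hall
    rw [hc, if_pos (by omega)]
    symm
    simp only [List.all_eq_true, beq_iff_eq]
    exact hall
  · have hc : List.countP (fun k : Nat => decide (PySem.List.pyGetD (x :: xs) (k : Int) 0 = PySem.List.pyGetD (x :: xs) ((k + 1 : Nat) : Int) 0)) (List.range xs.length) ≠ xs.length :=
      fun h => hall (key.mp h)
    have hne : ¬ (0 + ((List.countP (fun k : Nat => decide (PySem.List.pyGetD (x :: xs) (k : Int) 0 = PySem.List.pyGetD (x :: xs) ((k + 1 : Nat) : Int) 0)) (List.range xs.length) : Nat) : Int) = (xs.length : Int)) := by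
      omega
    rw [if_neg hne]
    symm
    rw [List.all_eq_false]
    push Not at hall
    obtain ⟨y, hy, hy'⟩ := hall
    exact ⟨y, hy, by simpa using hy'⟩

-- ===== VERDICT (by name: the statement is the Claim_ definition above) =====
theorem es_generala_spec : Claim_equal_es_generala := by
  intro tirada _
  unfold Spec_es_generala
  cases tirada with
  | nil => decide
  | cons x xs => rw [esA_char, esB_char]
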